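-- pv_equiv track=rewrite | github.com/samcarmen/advent-of-code-2015 | code/D1.py | find_basement_entry
-- ===== SOURCE A (Python) =====
-- def find_basement_entry(instructions: str) -> int:
--     floor = 0
--     for position, char in enumerate(instructions, 1):
--         if char == "(":
--             floor += 1
--         elif char == ")":
--             floor -= 1
--
--         if floor == -1:
--             return position
--     return None  # Santa never enters the basement with the given instructions
-- ===== SOURCE B (Python) =====
-- def find_basement_entry(instructions: str) -> int:
--     # Build the running-floor (prefix-sum) sequence eagerly, then search it
--     # for the first value -1 (decomposition: prefix-sum view + search).
--     floors = []
--     floor = 0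
--     for char in instructions:
--         floor += 1 if char == "(" else -1 if char == ")" else 0
--         floors.append(floor)
--     return next((pos for pos, f in enumerate(floors, 1) if f == -1), None)
-- ===== Notes on version B (the rewrite author's own statement) =====
-- stated objective: alternative
-- what changed: B separates the computation into two phases: it materialises the running-floor prefix-sum sequence first and then searches it for the first -1 with next/enumerate, instead of A's single loop that mutates a floor counter and early-returns inline.
import Mathlib
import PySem

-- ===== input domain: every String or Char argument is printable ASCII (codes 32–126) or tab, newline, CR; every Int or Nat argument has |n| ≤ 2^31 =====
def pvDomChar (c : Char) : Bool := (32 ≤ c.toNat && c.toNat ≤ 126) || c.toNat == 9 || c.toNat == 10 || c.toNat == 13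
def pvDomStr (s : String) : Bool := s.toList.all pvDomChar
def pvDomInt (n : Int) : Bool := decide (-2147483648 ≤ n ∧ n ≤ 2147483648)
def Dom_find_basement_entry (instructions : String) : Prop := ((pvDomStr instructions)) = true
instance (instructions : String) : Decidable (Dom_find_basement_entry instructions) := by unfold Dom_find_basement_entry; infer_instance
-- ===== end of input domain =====

-- B separates the work into two phases — build the running-floor prefix-sum list, then search it for the first -1 —
-- instead of A's single inline loop with early return (alternative decomposition, same cost).


-- ===== PORT A =====
-- A's loop: enumerate(instructions, 1), mutate floor, early return when floor == -1.
def findBasementLoopA : List Char → Int → Int → Option Int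
  | [], _, _ => none
  | c :: rest, pos, floor =>
    let floor' := if c = '(' then floor + 1 else if c = ')' then floor - 1 else floor
    if floor' = -1 then some pos else findBasementLoopA rest (pos + 1) floor'

def find_basement_entry (instructions : String) : Option Int :=
  findBasementLoopA instructions.toList 1 0

-- ===== PORT B =====
-- phase 1: the running-floor prefix-sum list
def floorsB : List Char → Int → List Int
  | [], _ => []
  | c :: rest, floor =>
    let floor' := floor + (if c = '(' then 1 else if c = ')' then -1 else 0)
    floor' :: floorsB rest floor'

-- phase 2: first position (1-based) whose running floor is -1
def searchB : List Int → Int → Option Int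
  | [], _ => none
  | f :: rest, pos => if f = -1 then some pos else searchB rest (pos + 1)

def find_basement_entry_alt (instructions : String) : Option Int :=
  searchB (floorsB instructions.toList 0) 1

-- ===== PRECONDITION & SPEC =====
def Spec_find_basement_entry (instructions : String) (out : Option Int) : Prop := out = find_basement_entry_alt instructions
instance (instructions : String) (out : Option Int) : Decidable (Spec_find_basement_entry instructions out) := by unfold Spec_find_basement_entry; infer_instance

-- ===== CLAIM (what is proved, stated in full; the proofs are below) =====
def Claim_equal_find_basement_entry : Prop := ∀ (instructions : String), Dom_find_basement_entry instructions → Spec_find_basement_entry instructions (find_basement_entry instructions)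

-- ===== LEMMAS AND PROOFS =====
theorem loopA_eq_search_floors (cs : List Char) : ∀ (pos floor : Int),
    findBasementLoopA cs pos floor = searchB (floorsB cs floor) pos := by
  induction cs with
  | nil => intro pos floor; rfl
  | cons c rest ih =>
    intro pos floor
    have hupd : (if c = '(' then floor + 1 else if c = ')' then floor - 1 else floor)
        = floor + (if c = '(' then 1 else if c = ')' then -1 else 0) := by
      by_cases h1 : c = '(' <;> by_cases h2 : c = ')' <;> simp [h1, h2] <;> ring
    simp only [findBasementLoopA, floorsB, searchB, hupd]
    split_ifs <;> first | rfl | exact ih _ _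

-- ===== VERDICT (by name: the statement is the Claim_ definition above) =====
theorem find_basement_entry_spec : Claim_equal_find_basement_entry := by
  intro s _
  unfold Spec_find_basement_entry find_basement_entry find_basement_entry_alt
  exact loopA_eq_search_floors s.toList 1 0
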